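-- pv_equiv track=rewrite | github.com/equal-shares/equal-shares | backend/examples/run_json_examples.py | get_bid_sums
-- ===== SOURCE A (Python) =====
-- def get_bid_sums(voters: list, bids: dict) -> dict:
--     bid_sums = {}
--     for voter in voters:
--         voter_total_bid = 0
--         for project, project_bids in bids.items():
--             if voter in project_bids:
--                 voter_total_bid += project_bids[voter]
--         bid_sums[voter] = voter_total_bid
--     return bid_sums
-- ===== SOURCE B (Python) =====
-- def get_bid_sums(voters: list, bids: dict) -> dict:
--     bid_sums = {voter: 0 for voter in voters}
--     for project_bids in bids.values():
--         for voter, amount in project_bids.items():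
--             if voter in bid_sums:
--                 bid_sums[voter] += amount
--     return bid_sums
-- ===== Notes on version B (the rewrite author's own statement) =====
-- stated objective: faster
-- what changed: Instead of rescanning every project's bid dict once per voter, B initialises every voter's sum to 0 and makes a single pass over all bids, accumulating each bid into its voter's entry.
import Mathlib
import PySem

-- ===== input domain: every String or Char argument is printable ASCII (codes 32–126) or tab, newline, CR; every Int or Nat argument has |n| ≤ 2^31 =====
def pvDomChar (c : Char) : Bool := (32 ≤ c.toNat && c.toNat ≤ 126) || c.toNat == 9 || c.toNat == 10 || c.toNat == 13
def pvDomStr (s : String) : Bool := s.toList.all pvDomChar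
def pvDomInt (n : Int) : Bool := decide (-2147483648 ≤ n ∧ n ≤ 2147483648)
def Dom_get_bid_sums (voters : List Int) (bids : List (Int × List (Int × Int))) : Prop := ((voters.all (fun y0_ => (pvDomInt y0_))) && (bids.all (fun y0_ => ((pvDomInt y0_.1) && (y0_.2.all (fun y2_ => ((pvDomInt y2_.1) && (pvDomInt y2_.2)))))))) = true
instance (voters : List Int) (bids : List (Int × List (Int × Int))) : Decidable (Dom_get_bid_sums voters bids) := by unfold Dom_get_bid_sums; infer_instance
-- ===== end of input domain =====

-- B replaces A's per-voter rescan of all project bid dicts by one accumulation pass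
-- over the bids; proved equal on association lists that represent Python dicts (no duplicate keys).

-- ===== PORT A =====
-- Literal port of A: for each voter, scan every project's bid dict and add the
-- voter's bid if present; insert the total into the result dict.
def get_bid_sums (voters : List Int) (bids : List (Int × List (Int × Int))) : List (Int × Int) :=
  (voters.foldl
    (fun (bid_sums : PySem.Dict Int Int) voter =>
      bid_sums.insert voter
        (bids.foldl
          (fun voter_total_bid pb =>
            if (PySem.Dict.mk pb.2).contains voter then
              voter_total_bid + (PySem.Dict.mk pb.2).getD voter 0
            else voter_total_bid)
          0))
    PySem.Dict.empty).items

-- ===== PORT B =====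
-- Literal port of B: initialise every voter's sum to 0, then one pass over all bids.
def get_bid_sums_alt (voters : List Int) (bids : List (Int × List (Int × Int))) : List (Int × Int) :=
  (bids.foldl
    (fun (bid_sums : PySem.Dict Int Int) pb =>
      pb.2.foldl
        (fun bid_sums kv =>
          if bid_sums.contains kv.1 then
            bid_sums.insert kv.1 (bid_sums.getD kv.1 0 + kv.2)
          else bid_sums)
        bid_sums)
    (voters.foldl (fun (d : PySem.Dict Int Int) voter => d.insert voter 0) PySem.Dict.empty)).items

-- ===== PRECONDITION & SPEC =====
-- Pre_ excludes association lists with duplicate keys (in bids itself or in any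
-- project's bid list): those do not represent a Python dict, which A receives.
def Pre_get_bid_sums (voters : List Int) (bids : List (Int × List (Int × Int))) : Prop :=
  (bids.map Prod.fst).Nodup ∧ ∀ pb ∈ bids, (pb.2.map Prod.fst).Nodup
instance (voters : List Int) (bids : List (Int × List (Int × Int))) : Decidable (Pre_get_bid_sums voters bids) := by unfold Pre_get_bid_sums; infer_instance

def pvWitness_get_bid_sums : List Int × (List (Int × List (Int × Int))) :=
  ([1, 2], [(10, [(1, 5), (3, 7)]), (11, [(2, 4)])])

def Spec_get_bid_sums (voters : List Int) (bids : List (Int × List (Int × Int))) (out : List (Int × Int)) : Prop := out = get_bid_sums_alt voters bids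
instance (voters : List Int) (bids : List (Int × List (Int × Int))) (out : List (Int × Int)) : Decidable (Spec_get_bid_sums voters bids out) := by unfold Spec_get_bid_sums; infer_instance

-- ===== CLAIM (what is proved, stated in full; the proofs are below) =====
def Claim_equal_get_bid_sums : Prop := ∀ (voters : List Int) (bids : List (Int × List (Int × Int))), Dom_get_bid_sums voters bids → Pre_get_bid_sums voters bids → Spec_get_bid_sums voters bids (get_bid_sums voters bids)

-- ===== LEMMAS AND PROOFS =====

-- A's per-voter total, as a named function (same fold as in the port).
def totalA (bids : List (Int × List (Int × Int))) (voter : Int) : Int :=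
  bids.foldl
    (fun t pb =>
      if (PySem.Dict.mk pb.2).contains voter then t + (PySem.Dict.mk pb.2).getD voter 0
      else t) 0

-- B's contribution of one project's bid list to key k.
def innerSum (l : List (Int × Int)) (k : Int) : Int :=
  ((l.filter (fun kv => kv.1 == k)).map Prod.snd).sum

-- B's total contribution of all bids to key k.
def totalB (bids : List (Int × List (Int × Int))) (k : Int) : Int :=
  (bids.map (fun pb => innerSum pb.2 k)).sum

theorem get_bid_sums_def (voters : List Int) (bids : List (Int × List (Int × Int))) :
    get_bid_sums voters bids =
      (voters.foldl (fun (d : PySem.Dict Int Int) v => d.insert v (totalA bids v)) PySem.Dict.empty).items := rfl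

theorem innerSum_nil (k : Int) : innerSum [] k = 0 := rfl

theorem innerSum_cons_eq (x : Int × Int) (xs : List (Int × Int)) (k : Int) (h : x.1 = k) :
    innerSum (x :: xs) k = x.2 + innerSum xs k := by
  simp [innerSum, h]

theorem innerSum_cons_ne (x : Int × Int) (xs : List (Int × Int)) (k : Int) (h : ¬ x.1 = k) :
    innerSum (x :: xs) k = innerSum xs k := by
  simp [innerSum, h]

-- ---- characterising A's dict ----

theorem getD_foldl_insert_fn (g : Int → Int) (l : List Int) (d : PySem.Dict Int Int) (k : Int) :
    (l.foldl (fun (d : PySem.Dict Int Int) v => d.insert v (g v)) d).getD k 0 =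
      if k ∈ l then g k else d.getD k 0 := by
  induction l generalizing d with
  | nil => simp
  | cons x xs ih =>
    simp only [List.foldl_cons, ih, PySem.Dict.getD_insert, List.mem_cons]
    by_cases hk : k ∈ xs
    · simp [hk]
    · by_cases hx : k = x <;> simp [hx, hk]

-- ---- characterising B's fold: keys are preserved, values accumulate ----

-- one update step of B
def updB (d : PySem.Dict Int Int) (kv : Int × Int) : PySem.Dict Int Int :=
  if d.contains kv.1 then d.insert kv.1 (d.getD kv.1 0 + kv.2) else d

theorem keys_updB (d : PySem.Dict Int Int) (kv : Int × Int) : (updB d kv).keys = d.keys := by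
  unfold updB
  by_cases h : d.contains kv.1 = true
  · rw [if_pos h]
    exact PySem.Dict.keys_insert_of_contains _ _ h
  · rw [if_neg h]

theorem contains_updB (d : PySem.Dict Int Int) (kv : Int × Int) (k : Int) :
    (updB d kv).contains k = d.contains k := by
  rw [PySem.Dict.contains_eq_decide_mem_keys, PySem.Dict.contains_eq_decide_mem_keys, keys_updB]

theorem keys_inner (l : List (Int × Int)) (d : PySem.Dict Int Int) :
    (l.foldl updB d).keys = d.keys := by
  induction l generalizing d with
  | nil => rfl
  | cons x xs ih => simp [List.foldl_cons, ih, keys_updB]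

theorem contains_inner (l : List (Int × Int)) (d : PySem.Dict Int Int) (k : Int) :
    (l.foldl updB d).contains k = d.contains k := by
  rw [PySem.Dict.contains_eq_decide_mem_keys, PySem.Dict.contains_eq_decide_mem_keys, keys_inner]

theorem getD_inner (l : List (Int × Int)) (d : PySem.Dict Int Int) (k : Int) :
    (l.foldl updB d).getD k 0 =
      d.getD k 0 + (if d.contains k then innerSum l k else 0) := by
  induction l generalizing d with
  | nil => simp [innerSum_nil]
  | cons x xs ih =>
    simp only [List.foldl_cons, ih, contains_updB]
    unfold updB
    by_cases hc : d.contains x.1 = true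
    · rw [if_pos hc]
      by_cases hk : k = x.1
      · subst hk
        rw [PySem.Dict.getD_insert_self, innerSum_cons_eq x xs x.1 rfl]
        simp only [hc, if_true]
        ring
      · rw [PySem.Dict.getD_insert, if_neg hk,
          innerSum_cons_ne x xs k (fun h => hk h.symm)]
    · rw [if_neg hc]
      by_cases hck : d.contains k = true
      · have hk : ¬ x.1 = k := by rintro rfl; exact hc hck
        rw [innerSum_cons_ne x xs k hk]
      · simp [hck]

theorem keys_outer (bids : List (Int × List (Int × Int))) (d : PySem.Dict Int Int) :
    (bids.foldl (fun d pb => pb.2.foldl updB d) d).keys = d.keys := by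
  induction bids generalizing d with
  | nil => rfl
  | cons x xs ih => simp [List.foldl_cons, ih, keys_inner]

theorem getD_outer (bids : List (Int × List (Int × Int))) (d : PySem.Dict Int Int) (k : Int) :
    (bids.foldl (fun d pb => pb.2.foldl updB d) d).getD k 0 =
      d.getD k 0 + (if d.contains k then totalB bids k else 0) := by
  induction bids generalizing d with
  | nil => simp [totalB]
  | cons x xs ih =>
    simp only [List.foldl_cons, ih, getD_inner, contains_inner]
    by_cases hc : d.contains k = true
    · simp only [if_pos hc, totalB, List.map_cons, List.sum_cons]; ring
    · simp [hc]

-- ---- the two per-key totals agree when each project's bid list has unique keys ----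

theorem innerSum_eq_getD (l : List (Int × Int)) (k : Int) (hnd : (l.map Prod.fst).Nodup) :
    innerSum l k =
      if (PySem.Dict.mk l).contains k then (PySem.Dict.mk l).getD k 0 else 0 := by
  induction l with
  | nil => simp [innerSum_nil]
  | cons x xs ih =>
    simp only [List.map_cons, List.nodup_cons] at hnd
    have ihx := ih hnd.2
    by_cases hk : x.1 = k
    · subst hk
      have hfilt : xs.filter (fun kv => kv.1 == x.1) = [] := by
        apply List.filter_eq_nil_iff.mpr
        intro kv hkv
        simp only [beq_iff_eq]
        intro h
        exact hnd.1 (h ▸ List.mem_map_of_mem hkv)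
      have hcon : (PySem.Dict.mk (x :: xs)).contains x.1 = true := by
        rw [PySem.Dict.contains_eq_decide_mem_keys]
        simp [PySem.Dict.keys_mk]
      have hget : (PySem.Dict.mk (x :: xs)).getD x.1 0 = x.2 := by
        rw [PySem.Dict.getD_eq_get?_getD, PySem.Dict.get?_mk_cons]
        simp
      rw [innerSum_cons_eq x xs x.1 rfl, hcon, hget]
      simp [innerSum, hfilt]
    · have hk' : ¬ k = x.1 := fun h => hk h.symm
      have hcon : (PySem.Dict.mk (x :: xs)).contains k = (PySem.Dict.mk xs).contains k := by
        rw [PySem.Dict.contains_eq_decide_mem_keys, PySem.Dict.contains_eq_decide_mem_keys,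
          PySem.Dict.keys_mk, PySem.Dict.keys_mk]
        simp [List.mem_cons, hk']
      have hget : (PySem.Dict.mk (x :: xs)).getD k 0 = (PySem.Dict.mk xs).getD k 0 := by
        rw [PySem.Dict.getD_eq_get?_getD, PySem.Dict.getD_eq_get?_getD, PySem.Dict.get?_mk_cons]
        simp [hk]
      rw [innerSum_cons_ne x xs k hk, hcon, hget, ihx]

theorem foldl_totalA_shift (xs : List (Int × List (Int × Int))) (k t : Int) :
    xs.foldl (fun t pb =>
        if (PySem.Dict.mk pb.2).contains k then t + (PySem.Dict.mk pb.2).getD k 0 else t) t =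
      t + totalA xs k := by
  induction xs generalizing t with
  | nil => simp [totalA]
  | cons y ys ih =>
    unfold totalA
    simp only [List.foldl_cons]
    rw [ih, ih]
    by_cases hc : (PySem.Dict.mk y.2).contains k = true
    · rw [if_pos hc, if_pos hc]; ring
    · rw [if_neg hc, if_neg hc]; ring

theorem totalA_eq_totalB (bids : List (Int × List (Int × Int))) (k : Int)
    (hnd : ∀ pb ∈ bids, (pb.2.map Prod.fst).Nodup) :
    totalA bids k = totalB bids k := by
  induction bids with
  | nil => rfl
  | cons x xs ih =>
    have hx := hnd x (List.mem_cons_self ..)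
    have hxs := ih (fun pb hpb => hnd pb (List.mem_cons_of_mem _ hpb))
    have hA : totalA (x :: xs) k =
        (if (PySem.Dict.mk x.2).contains k then (PySem.Dict.mk x.2).getD k 0 else 0)
          + totalA xs k := by
      unfold totalA
      simp only [List.foldl_cons]
      rw [foldl_totalA_shift, foldl_totalA_shift]
      by_cases hc : (PySem.Dict.mk x.2).contains k = true
      · simp only [hc, if_true]; ring
      · simp only [hc, if_false, Bool.false_eq_true]; ring
    rw [hA, ← innerSum_eq_getD x.2 k hx, hxs]
    simp [totalB]

-- ===== VERDICT (by name: the statement is the Claim_ definition above) =====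
theorem get_bid_sums_spec : Claim_equal_get_bid_sums := by
  intro voters bids _ hpre
  unfold Spec_get_bid_sums get_bid_sums_alt
  rw [get_bid_sums_def]
  set dA := voters.foldl (fun (d : PySem.Dict Int Int) v => d.insert v (totalA bids v)) PySem.Dict.empty with hdA
  set d0 := voters.foldl (fun (d : PySem.Dict Int Int) v => d.insert v (0 : Int)) PySem.Dict.empty with hd0
  have hfold : (bids.foldl
      (fun (bid_sums : PySem.Dict Int Int) pb =>
        pb.2.foldl (fun bid_sums kv =>
          if bid_sums.contains kv.1 then bid_sums.insert kv.1 (bid_sums.getD kv.1 0 + kv.2)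
          else bid_sums) bid_sums) d0) =
      bids.foldl (fun d pb => pb.2.foldl updB d) d0 := rfl
  rw [hfold]
  set dB := bids.foldl (fun d pb => pb.2.foldl updB d) d0 with hdB
  -- keys
  have hkA : dA.keys = PySem.Set.update (PySem.Dict.empty : PySem.Dict Int Int).keys voters := by
    rw [hdA]; exact PySem.Dict.keys_foldl_insert voters _ _
  have hk0 : d0.keys = PySem.Set.update (PySem.Dict.empty : PySem.Dict Int Int).keys voters := by
    rw [hd0]; exact PySem.Dict.keys_foldl_insert voters _ _
  have hkB : dB.keys = dA.keys := by rw [hdB, keys_outer, hk0, hkA]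
  have hndA : dA.keys.Nodup := by
    rw [hdA]; exact PySem.Dict.nodup_keys_foldl_insert voters _ _ PySem.Dict.nodup_keys_empty
  have hndB : dB.keys.Nodup := hkB ▸ hndA
  -- pointwise values on the (shared) keys
  have hval : ∀ k ∈ dA.keys, dA.getD k 0 = dB.getD k 0 := by
    intro k hk
    have hkv : k ∈ voters := by
      rw [hkA] at hk
      rcases (PySem.Set.mem_update _ _ _).mp hk with h | h
      · simp [PySem.Dict.keys_empty] at h
      · exact h
    have hA : dA.getD k 0 = totalA bids k := by
      rw [hdA, getD_foldl_insert_fn]; simp [hkv]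
    have h0 : d0.getD k 0 = 0 := by
      rw [hd0, getD_foldl_insert_fn]; simp [hkv]
    have h0c : d0.contains k = true := by
      rw [PySem.Dict.contains_eq_decide_mem_keys, hk0, ← hkA]
      simpa using hk
    have hB : dB.getD k 0 = totalB bids k := by
      rw [hdB, getD_outer, h0, h0c]; simp
    rw [hA, hB, totalA_eq_totalB bids k hpre.2]
  -- items agree
  rw [PySem.Dict.items_eq_map_keys dA hndA 0, PySem.Dict.items_eq_map_keys dB hndB 0, ← hkB]
  exact List.map_congr_left (fun k hk => by rw [hval k (hkB ▸ hk)])
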